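-- pv_equiv track=rewrite | github.com/EliasAroni2000/automatas | Aroni-tp1-v2.py | tokenOperadoSuma
-- ===== SOURCE A (Python) =====
-- estado_final = "estado final"
--
-- estadoNoFinal = "estado no aceptado"
--
-- estadoTrampa = "estado trampa"
--
-- def tokenOperadoSuma(lexema):
--     estado = 0
--     estadoFinal = [1]
--     caracter = {0:{'+':1},1:{}}
--     for c in lexema:
--         if c in caracter[estado]:
--             estado = caracter[estado][c]
--         else:
--             estado = -1
--             break
--     if estado == -1:
--         return estadoTrampa
--     if estado in estadoFinal:
--         return estado_final
--     else:
--         return estadoNoFinal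
-- ===== SOURCE B (Python) =====
-- estado_final = "estado final"
--
-- estadoNoFinal = "estado no aceptado"
--
-- estadoTrampa = "estado trampa"
--
-- def tokenOperadoSuma(lexema):
--     if lexema == '+':
--         return estado_final
--     if lexema == '':
--         return estadoNoFinal
--     return estadoTrampa
-- ===== Notes on version B (the rewrite author's own statement) =====
-- stated objective: simpler
-- what changed: Replaces the character-by-character DFA transition-table loop with a direct closed-form classification of the whole string ('+' accepts, '' is the non-accepting start state, anything else is the trap).
import Mathlib
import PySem

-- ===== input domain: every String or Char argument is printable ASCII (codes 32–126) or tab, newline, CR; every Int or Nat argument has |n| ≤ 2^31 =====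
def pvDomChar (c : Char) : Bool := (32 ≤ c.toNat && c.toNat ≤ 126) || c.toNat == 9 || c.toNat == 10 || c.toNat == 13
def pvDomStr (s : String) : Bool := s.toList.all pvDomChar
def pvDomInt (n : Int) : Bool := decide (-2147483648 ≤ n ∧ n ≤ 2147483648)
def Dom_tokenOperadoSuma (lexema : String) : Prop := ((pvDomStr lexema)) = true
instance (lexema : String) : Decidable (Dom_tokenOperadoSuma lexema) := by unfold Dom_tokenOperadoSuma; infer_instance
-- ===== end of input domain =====

-- B replaces A's DFA transition-table loop by a direct closed-form classification
-- of the whole string (simpler; same return values from the same module constants).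

-- ===== PORT A =====
-- module-level constants
def pvEstadoFinalStr : String := "estado final"
def pvEstadoNoFinal : String := "estado no aceptado"
def pvEstadoTrampa : String := "estado trampa"
-- caracter = {0:{'+':1},1:{}}
def pvCaracter : PySem.Dict Int (PySem.Dict Char Int) :=
  PySem.Dict.ofList [(0, PySem.Dict.ofList [('+', 1)]), (1, PySem.Dict.ofList [])]

-- the 'for c in lexema' loop with its break (break modelled by returning the -1 state;
-- caracter[estado] exists for every state the loop reaches, so getD empty is exact here)
def pvLoopA (estado : Int) (cs : List Char) : Int :=
  match cs with
  | [] => estado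
  | c :: rest =>
    let inner := (PySem.Dict.get? pvCaracter estado).getD PySem.Dict.empty
    if (PySem.Dict.get? inner c).isSome then
      pvLoopA ((PySem.Dict.get? inner c).getD 0) rest
    else
      -1  -- estado = -1; break

def tokenOperadoSuma (lexema : String) : String :=
  let estadoFinal : List Int := [1]
  let estado := pvLoopA 0 lexema.toList
  if estado = -1 then pvEstadoTrampa
  else if estado ∈ estadoFinal then pvEstadoFinalStr
  else pvEstadoNoFinal

-- ===== PORT B =====
def tokenOperadoSuma_alt (lexema : String) : String :=
  if lexema = "+" then pvEstadoFinalStr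
  else if lexema = "" then pvEstadoNoFinal
  else pvEstadoTrampa

-- ===== PRECONDITION & SPEC =====
def Spec_tokenOperadoSuma (lexema : String) (out : String) : Prop := out = tokenOperadoSuma_alt lexema
instance (lexema : String) (out : String) : Decidable (Spec_tokenOperadoSuma lexema out) := by unfold Spec_tokenOperadoSuma; infer_instance

-- ===== CLAIM (what is proved, stated in full; the proofs are below) =====
def Claim_equal_tokenOperadoSuma : Prop := ∀ (lexema : String), Dom_tokenOperadoSuma lexema → Spec_tokenOperadoSuma lexema (tokenOperadoSuma lexema)

-- ===== LEMMAS AND PROOFS =====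
theorem pvDict0 : (PySem.Dict.get? pvCaracter 0).getD PySem.Dict.empty
    = PySem.Dict.mk [('+', 1)] := by decide

theorem pvDict1 : (PySem.Dict.get? pvCaracter 1).getD PySem.Dict.empty
    = PySem.Dict.mk [] := by decide

theorem pvLoopA_one (l : List Char) : pvLoopA 1 l = if l = [] then 1 else -1 := by
  cases l with
  | nil => rfl
  | cons d rest =>
    simp only [pvLoopA, pvDict1]
    simp [PySem.Dict.get?]

theorem pvLoopA_cases (l : List Char) :
    pvLoopA 0 l = if l = [] then 0 else if l = ['+'] then 1 else -1 := by
  cases l with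
  | nil => rfl
  | cons c rest =>
    simp only [pvLoopA, pvDict0]
    by_cases h : c = '+'
    · subst h
      simp only [PySem.Dict.get?_mk_cons]
      simp [pvLoopA_one]
    · have h' : ('+' == c) = false := by
        simp only [beq_eq_false_iff_ne, ne_eq]
        exact fun hx => h hx.symm
      simp [h', PySem.Dict.get?, h]

theorem pvStr_eq_iff_toList (s : String) (t : String) : s = t ↔ s.toList = t.toList := by
  constructor
  · intro h; rw [h]
  · intro h; exact String.toList_inj.mp h

-- ===== VERDICT (by name: the statement is the Claim_ definition above) =====
theorem tokenOperadoSuma_spec : Claim_equal_tokenOperadoSuma := by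
  intro lexema _
  unfold Spec_tokenOperadoSuma tokenOperadoSuma tokenOperadoSuma_alt
  simp only [pvLoopA_cases, pvStr_eq_iff_toList lexema "+", pvStr_eq_iff_toList lexema "",
    show ("+" : String).toList = ['+'] from rfl, show ("" : String).toList = [] from rfl]
  by_cases hp : lexema.toList = ['+']
  · simp [hp]
  · by_cases he : lexema.toList = []
    · simp [he]
    · simp [hp, he]
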